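-- pv_equiv track=rewrite | github.com/Copetim1/Workflow-Optimization-Automation-M-M-and-Sports-Coord-Pairings | source/main.py | isSimilarMajor
-- ===== SOURCE A (Python) =====
-- def isSimilarMajor(major1, major2):
--     # Define groups of similar majors
--
--     similarMajors = {
--         'engineering': ['Mechanical Engineering','Aerospace Engineering', 'Electrical Engineering', 'Civil Engineering',
--                        'Chemical Engineering', 'Computer Engineering','Nuclear Engineering', 'Industrial & Systems Engineering',
--                          'Industrial Systems Engineering', 'Biomedical Engineering', 'Digital Arts & Sciences'],
--
--         'computer_science': ['Computer Science', 'Information Systems',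
--                              'Data Science', 'Digital Arts & Sciences'],
--
--         'business': ['Business Administration', 'Finance', 'Accounting', 'Marketing',
--                     'Economics'],
--
--         'pre_health': ['Health Science', 'Biomedical Engineering', 'Microbiology and Cell Science',
--                         'Chemistry', 'Biochemistry', 'Biology', 'Public Health', 'Microbiology']
--     }
--
--     # Check if both majors are in the same group
--     for group, majors in similarMajors.items():
--         if major1 in majors and major2 in majors:
--             return True
--
--     return False
-- ===== SOURCE B (Python) =====
-- # Precomputed bitmask index (major -> bitmask of the four similarity groups:
-- # engineering=1, computer_science=2, business=4, pre_health=8); the check is one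
-- # bitwise AND of two lookups instead of a scan over every group's list.
-- _MASK = {
--     'Mechanical Engineering': 1, 'Aerospace Engineering': 1, 'Electrical Engineering': 1,
--     'Civil Engineering': 1, 'Chemical Engineering': 1, 'Computer Engineering': 1,
--     'Nuclear Engineering': 1, 'Industrial & Systems Engineering': 1,
--     'Industrial Systems Engineering': 1, 'Biomedical Engineering': 1 | 8,
--     'Digital Arts & Sciences': 1 | 2,
--     'Computer Science': 2, 'Information Systems': 2, 'Data Science': 2,
--     'Business Administration': 4, 'Finance': 4, 'Accounting': 4, 'Marketing': 4, 'Economics': 4,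
--     'Health Science': 8, 'Microbiology and Cell Science': 8, 'Chemistry': 8,
--     'Biochemistry': 8, 'Biology': 8, 'Public Health': 8, 'Microbiology': 8,
-- }
--
--
-- def isSimilarMajor(major1, major2):
--     return (_MASK.get(major1, 0) & _MASK.get(major2, 0)) != 0
-- ===== Notes on version B (the rewrite author's own statement) =====
-- stated objective: idiomatic
-- what changed: Replaces the per-call scan over every group's member list with a precomputed inverted index mapping each major to a bitmask of the groups containing it, answering each query by a single bitwise AND of two dict lookups.
import Mathlib
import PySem

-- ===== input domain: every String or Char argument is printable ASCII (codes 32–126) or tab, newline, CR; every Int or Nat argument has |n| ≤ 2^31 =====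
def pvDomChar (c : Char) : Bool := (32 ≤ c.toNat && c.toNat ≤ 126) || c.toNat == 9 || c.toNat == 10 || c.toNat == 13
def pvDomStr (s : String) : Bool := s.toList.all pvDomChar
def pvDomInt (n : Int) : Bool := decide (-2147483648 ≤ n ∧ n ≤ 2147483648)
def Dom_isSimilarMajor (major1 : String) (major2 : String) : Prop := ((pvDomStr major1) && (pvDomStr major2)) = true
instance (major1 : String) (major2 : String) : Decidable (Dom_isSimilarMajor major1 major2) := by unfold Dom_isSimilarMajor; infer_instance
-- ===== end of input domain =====

-- B replaces A's per-call scan over every group list by a precomputed bitmask index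
-- (major -> bitmask of groups); the check becomes one bitwise AND of two lookups (idiomatic).


-- ===== PORT A =====
-- the literal dict of A, as its items in insertion order
def pvSimilarMajorsA : List (String × List String) :=
  [("engineering", ["Mechanical Engineering", "Aerospace Engineering", "Electrical Engineering", "Civil Engineering",
      "Chemical Engineering", "Computer Engineering", "Nuclear Engineering", "Industrial & Systems Engineering",
      "Industrial Systems Engineering", "Biomedical Engineering", "Digital Arts & Sciences"]),
   ("computer_science", ["Computer Science", "Information Systems", "Data Science", "Digital Arts & Sciences"]),
   ("business", ["Business Administration", "Finance", "Accounting", "Marketing", "Economics"]),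
   ("pre_health", ["Health Science", "Biomedical Engineering", "Microbiology and Cell Science",
      "Chemistry", "Biochemistry", "Biology", "Public Health", "Microbiology"])]

-- A's for-loop with early return
def pvLoopA (major1 major2 : String) : List (String × List String) → Bool
  | [] => false
  | (_, majors) :: rest =>
      if majors.contains major1 && majors.contains major2 then true
      else pvLoopA major1 major2 rest

def isSimilarMajor (major1 : String) (major2 : String) : Bool :=
  pvLoopA major1 major2 pvSimilarMajorsA

-- ===== PORT B =====
-- B's literal dict: engineering = bit 1, computer_science = bit 2, business = bit 4, pre_health = bit 8
def pvMaskB : PySem.Dict String Int :=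
  PySem.Dict.ofList
    [("Mechanical Engineering", 1), ("Aerospace Engineering", 1), ("Electrical Engineering", 1),
     ("Civil Engineering", 1), ("Chemical Engineering", 1), ("Computer Engineering", 1),
     ("Nuclear Engineering", 1), ("Industrial & Systems Engineering", 1),
     ("Industrial Systems Engineering", 1), ("Biomedical Engineering", PySem.Int.bor 1 8),
     ("Digital Arts & Sciences", PySem.Int.bor 1 2),
     ("Computer Science", 2), ("Information Systems", 2), ("Data Science", 2),
     ("Business Administration", 4), ("Finance", 4), ("Accounting", 4), ("Marketing", 4), ("Economics", 4),
     ("Health Science", 8), ("Microbiology and Cell Science", 8), ("Chemistry", 8),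
     ("Biochemistry", 8), ("Biology", 8), ("Public Health", 8), ("Microbiology", 8)]

def isSimilarMajor_alt (major1 : String) (major2 : String) : Bool :=
  decide (PySem.Int.band (pvMaskB.getD major1 0) (pvMaskB.getD major2 0) ≠ 0)

-- ===== PRECONDITION & SPEC =====
def Spec_isSimilarMajor (major1 : String) (major2 : String) (out : Bool) : Prop := out = isSimilarMajor_alt major1 major2
instance (major1 : String) (major2 : String) (out : Bool) : Decidable (Spec_isSimilarMajor major1 major2 out) := by unfold Spec_isSimilarMajor; infer_instance

-- ===== CLAIM (what is proved, stated in full; the proofs are below) =====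
def Claim_equal_isSimilarMajor : Prop := ∀ (major1 : String) (major2 : String), Dom_isSimilarMajor major1 major2 → Spec_isSimilarMajor major1 major2 (isSimilarMajor major1 major2)

-- ===== LEMMAS AND PROOFS =====

-- the four group lists, named for the proofs
def pvG1 : List String := ["Mechanical Engineering", "Aerospace Engineering", "Electrical Engineering", "Civil Engineering",
      "Chemical Engineering", "Computer Engineering", "Nuclear Engineering", "Industrial & Systems Engineering",
      "Industrial Systems Engineering", "Biomedical Engineering", "Digital Arts & Sciences"]
def pvG2 : List String := ["Computer Science", "Information Systems", "Data Science", "Digital Arts & Sciences"]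
def pvG3 : List String := ["Business Administration", "Finance", "Accounting", "Marketing", "Economics"]
def pvG4 : List String := ["Health Science", "Biomedical Engineering", "Microbiology and Cell Science",
      "Chemistry", "Biochemistry", "Biology", "Public Health", "Microbiology"]

-- the keys of B's dict (each major once)
def pvKeys : List String :=
  ["Mechanical Engineering", "Aerospace Engineering", "Electrical Engineering", "Civil Engineering",
   "Chemical Engineering", "Computer Engineering", "Nuclear Engineering", "Industrial & Systems Engineering",
   "Industrial Systems Engineering", "Biomedical Engineering", "Digital Arts & Sciences",
   "Computer Science", "Information Systems", "Data Science",
   "Business Administration", "Finance", "Accounting", "Marketing", "Economics",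
   "Health Science", "Microbiology and Cell Science", "Chemistry",
   "Biochemistry", "Biology", "Public Health", "Microbiology"]

-- A's loop returns true iff some group list contains both majors
lemma pvLoopA_iff (m1 m2 : String) (t : List (String × List String)) :
    pvLoopA m1 m2 t = true ↔ ∃ p ∈ t, m1 ∈ p.2 ∧ m2 ∈ p.2 := by
  induction t with
  | nil => simp [pvLoopA]
  | cons hd tl ih =>
    obtain ⟨g, majors⟩ := hd
    simp only [pvLoopA]
    split_ifs with h
    · simp only [Bool.and_eq_true, List.contains_iff_mem] at h
      simp only [true_iff]
      exact ⟨(g, majors), List.mem_cons_self, h.1, h.2⟩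
    · simp only [Bool.and_eq_true, List.contains_iff_mem] at h
      rw [ih]
      constructor
      · rintro ⟨p, hp, h1, h2⟩; exact ⟨p, List.mem_cons_of_mem _ hp, h1, h2⟩
      · rintro ⟨p, hp, h1, h2⟩
        rcases List.mem_cons.mp hp with rfl | hp'
        · exact absurd ⟨h1, h2⟩ h
        · exact ⟨p, hp', h1, h2⟩

lemma pvA_iff (m1 m2 : String) :
    isSimilarMajor m1 m2 = true ↔
      (m1 ∈ pvG1 ∧ m2 ∈ pvG1) ∨ (m1 ∈ pvG2 ∧ m2 ∈ pvG2) ∨ (m1 ∈ pvG3 ∧ m2 ∈ pvG3) ∨ (m1 ∈ pvG4 ∧ m2 ∈ pvG4) := by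
  have ht : pvSimilarMajorsA =
      [("engineering", pvG1), ("computer_science", pvG2), ("business", pvG3), ("pre_health", pvG4)] := rfl
  rw [isSimilarMajor, pvLoopA_iff, ht]
  simp

-- B's mask lookup, characterised by the four group memberships
lemma pvMask_eq (m : String) :
    pvMaskB.getD m 0 =
      (if m ∈ pvG1 then 1 else 0) + (if m ∈ pvG2 then 2 else 0) +
      (if m ∈ pvG3 then 4 else 0) + (if m ∈ pvG4 then 8 else 0) := by
  by_cases h : m ∈ pvKeys
  · simp only [pvKeys, List.mem_cons, List.not_mem_nil, or_false] at h
    rcases h with rfl|rfl|rfl|rfl|rfl|rfl|rfl|rfl|rfl|rfl|rfl|rfl|rfl|rfl|rfl|rfl|rfl|rfl|rfl|rfl|rfl|rfl|rfl|rfl|rfl|rfl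
    all_goals decide
  · have hs1 : ∀ x ∈ pvG1, x ∈ pvKeys := by decide
    have hs2 : ∀ x ∈ pvG2, x ∈ pvKeys := by decide
    have hs3 : ∀ x ∈ pvG3, x ∈ pvKeys := by decide
    have hs4 : ∀ x ∈ pvG4, x ∈ pvKeys := by decide
    have hc : pvMaskB.contains m = false := by
      have hmk : pvMaskB = { items := (pvKeys.zip [(1:Int),1,1,1,1,1,1,1,1,9,3,2,2,2,4,4,4,4,4,8,8,8,8,8,8,8]) } := by decide
      rw [hmk, PySem.Dict.contains_mk]
      simp only [List.any_eq_false, beq_iff_eq]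
      intro p hp heq
      exact h (heq ▸ (List.of_mem_zip hp).1)
    rw [PySem.Dict.getD_of_not_contains _ _ hc,
        if_neg (fun hm => h (hs1 m hm)), if_neg (fun hm => h (hs2 m hm)),
        if_neg (fun hm => h (hs3 m hm)), if_neg (fun hm => h (hs4 m hm))]
    norm_num

-- ===== VERDICT (by name: the statement is the Claim_ definition above) =====
theorem isSimilarMajor_spec : Claim_equal_isSimilarMajor := by
  intro m1 m2 _
  unfold Spec_isSimilarMajor isSimilarMajor_alt
  rw [Bool.eq_iff_iff, pvA_iff, decide_eq_true_iff, pvMask_eq, pvMask_eq]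
  by_cases a1 : m1 ∈ pvG1 <;> by_cases a2 : m1 ∈ pvG2 <;> by_cases a3 : m1 ∈ pvG3 <;> by_cases a4 : m1 ∈ pvG4 <;>
    by_cases b1 : m2 ∈ pvG1 <;> by_cases b2 : m2 ∈ pvG2 <;> by_cases b3 : m2 ∈ pvG3 <;> by_cases b4 : m2 ∈ pvG4 <;>
    simp only [a1, a2, a3, a4, b1, b2, b3, b4, if_true, if_false] <;> simp_all <;> decide
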